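-- pv_equiv track=rewrite | github.com/NEXTAltair/Lorayougazouwoiroirosurusukuriputo | src/module/cleanup_txt.py | tags_to_dict
-- ===== SOURCE A (Python) =====
-- def tags_to_dict(tags : str) -> dict:
--     """タグを辞書に変換するして重複を避ける
--     Args:
--         tags (str): タグ
--     Returns:
--         tags_dict (dict): タグの辞書
--     """
--     # タグをカンマで分割し、不要な空白を取り除く
--     tag_list = [tag.strip() for tag in tags.split(",") if tag.strip()]
--
--     # 重複を避けるためのセット
--     seen_tags = set()
--     tags_dict = {}
--     for i, tag in enumerate(tag_list):
--         if tag not in seen_tags: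
--             seen_tags.add(tag)
--             tags_dict[i] = tag
--     return tags_dict
-- ===== SOURCE B (Python) =====
-- def tags_to_dict(tags: str) -> dict:
--     """Split on commas, strip, and keep each distinct tag at the index of
--     its first occurrence. Recursive dedup: keep the head pair and filter
--     every later duplicate of its tag out of the remainder (no seen-set)."""
--     tag_list = [tag.strip() for tag in tags.split(",") if tag.strip()]
--
--     def build(pairs):
--         if not pairs:
--             return []
--         i, tag = pairs[0]
--         return [(i, tag)] + build([p for p in pairs[1:] if p[1] != tag])
--
--     return dict(build(list(enumerate(tag_list))))
-- ===== Notes on version B (the rewrite author's own statement) =====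
-- stated objective: alternative
-- what changed: Replaces the single accumulating pass with a seen-set and incrementally built dict by a recursion on the enumerated pairs that keeps the head and filters all later duplicates of its tag out of the remainder, assembling the pair list and converting to a dict once at the end.
import Mathlib
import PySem

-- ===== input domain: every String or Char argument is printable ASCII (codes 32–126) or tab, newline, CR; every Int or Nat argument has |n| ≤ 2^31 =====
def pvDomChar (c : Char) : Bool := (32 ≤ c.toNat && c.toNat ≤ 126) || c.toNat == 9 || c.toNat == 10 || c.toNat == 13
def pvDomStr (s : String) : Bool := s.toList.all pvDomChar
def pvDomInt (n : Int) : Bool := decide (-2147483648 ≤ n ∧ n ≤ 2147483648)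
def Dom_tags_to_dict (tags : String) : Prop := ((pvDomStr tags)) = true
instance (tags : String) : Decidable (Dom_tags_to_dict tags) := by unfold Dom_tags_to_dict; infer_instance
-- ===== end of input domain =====

-- B replaces the seen-set accumulating loop by a recursion on the enumerated pairs that
-- filters later duplicates of the head's tag out of the remainder (alternative decomposition).

-- ===== PORT A =====
-- tag_list = [tag.strip() for tag in tags.split(",") if tag.strip()]
def pvTagList (tags : String) : List String :=
  ((PySem.Str.split? tags ",").getD []).filterMap
    (fun t => if PySem.Str.strip t ≠ "" then some (PySem.Str.strip t) else none)

def tags_to_dict (tags : String) : List (Int × String) :=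
  let tag_list := pvTagList tags
  -- seen_tags = set(); tags_dict = {}; for i, tag in enumerate(tag_list): …
  let st := (PySem.List.enumerate tag_list 0).foldl
    (fun (st : PySem.Set String × PySem.Dict Int String) p =>
      if ¬ st.1.contains p.2 then (st.1.add p.2, st.2.insert p.1 p.2) else st)
    (PySem.Set.empty, PySem.Dict.empty)
  st.2.items

-- ===== PORT B =====
-- def build(pairs): if not pairs: return []
--   i, tag = pairs[0]; return [(i, tag)] + build([p for p in pairs[1:] if p[1] != tag])
def pvBuild : List (Int × String) → List (Int × String)
  | [] => []
  | (i, tag) :: rest => (i, tag) :: pvBuild (rest.filter (fun p => p.2 ≠ tag))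
termination_by l => l.length
decreasing_by
  simpa using Nat.lt_succ_of_le (List.length_filter_le _ rest.attach)

-- return dict(build(list(enumerate(tag_list))))
def tags_to_dict_alt (tags : String) : List (Int × String) :=
  let tag_list := pvTagList tags
  ((pvBuild (PySem.List.enumerate tag_list 0)).foldl
    (fun (d : PySem.Dict Int String) p => d.insert p.1 p.2) PySem.Dict.empty).items

-- ===== PRECONDITION & SPEC =====
def Spec_tags_to_dict (tags : String) (out : List (Int × String)) : Prop := out = tags_to_dict_alt tags
instance (tags : String) (out : List (Int × String)) : Decidable (Spec_tags_to_dict tags out) := by unfold Spec_tags_to_dict; infer_instance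

-- ===== CLAIM (what is proved, stated in full; the proofs are below) =====
def Claim_equal_tags_to_dict : Prop := ∀ (tags : String), Dom_tags_to_dict tags → Spec_tags_to_dict tags (tags_to_dict tags)

-- ===== LEMMAS AND PROOFS =====

-- the keys pvBuild returns are drawn (as a sublist) from the keys of its input
theorem pvBuild_fst_sublist (l : List (Int × String)) :
    ((pvBuild l).map Prod.fst).Sublist (l.map Prod.fst) :=
  match l with
  | [] => by simp [pvBuild]
  | (i, tag) :: rest => by
    rw [pvBuild]
    simp only [List.map_cons]
    exact ((pvBuild_fst_sublist _).trans (rest.filter_sublist.map Prod.fst)).cons₂ _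
termination_by l.length
decreasing_by simpa using Nat.lt_succ_of_le (List.length_filter_le _ rest)

theorem pvBuild_keys_nodup (l : List (Int × String))
    (h : (l.map Prod.fst).Nodup) : ((pvBuild l).map Prod.fst).Nodup :=
  (pvBuild_fst_sublist l).nodup h

-- A's loop, from an arbitrary intermediate state, produces exactly pvBuild of the unseen pairs
theorem pv_loop_eq : ∀ (l : List String) (n : Int) (seen : PySem.Set String)
    (d : PySem.Dict Int String), (∀ k ∈ d.keys, k < n) →
    ((PySem.List.enumerate l n).foldl
      (fun (st : PySem.Set String × PySem.Dict Int String) p =>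
        if ¬ st.1.contains p.2 then (st.1.add p.2, st.2.insert p.1 p.2) else st)
      (seen, d)).2.items
    = d.items ++ pvBuild ((PySem.List.enumerate l n).filter
        (fun p => !(seen.contains p.2))) := by
  intro l
  induction l with
  | nil => intro n seen d _; simp [PySem.List.enumerate_nil, pvBuild]
  | cons x rest ih =>
    intro n seen d hd
    rw [PySem.List.enumerate_cons]
    simp only [List.foldl_cons, List.filter_cons]
    by_cases hx : x ∈ seen
    · have hc : seen.contains x = true := (PySem.Set.contains_iff seen x).2 hx
      rw [if_neg (by simp [hx])]
      simp only [hc, Bool.not_true, if_neg (by simp : ¬ (false = true))]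
      exact ih (n + 1) seen d (fun k hk => lt_trans (hd k hk) (by omega))
    · have hc : seen.contains x = false := by
        rw [Bool.eq_false_iff]
        intro h; exact hx ((PySem.Set.contains_iff seen x).1 h)
      rw [if_pos (by simp [hx])]
      have hnk : d.contains n = false := by
        rw [Bool.eq_false_iff]
        intro h
        exact absurd (hd n ((PySem.Dict.contains_iff_mem_keys d n).1 h)) (lt_irrefl n)
      have hkeys : ∀ k ∈ (d.insert n x).keys, k < n + 1 := by
        intro k hk
        rw [PySem.Dict.keys_insert_of_not_contains d x hnk] at hk
        rcases List.mem_append.1 hk with h | h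
        · exact lt_trans (hd k h) (by omega)
        · simp at h; omega
      rw [ih (n + 1) (seen.add x) (d.insert n x) hkeys,
        PySem.Dict.items_insert_of_not_contains d x hnk]
      simp only [hc, Bool.not_false, if_true, List.append_assoc, List.singleton_append]
      congr 2
      rw [pvBuild]
      congr 1
      rw [List.filter_filter]
      congr 1
      apply List.filter_congr
      intro p _
      by_cases hpx : p.2 = x
      · simp [hpx, PySem.Set.mem_add]
      · by_cases hps : p.2 ∈ seen <;>
          simp [hpx, hps, PySem.Set.mem_add]

-- ===== VERDICT (by name: the statement is the Claim_ definition above) =====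
theorem tags_to_dict_spec : Claim_equal_tags_to_dict := by
  intro tags _
  unfold Spec_tags_to_dict tags_to_dict tags_to_dict_alt
  have h := pv_loop_eq (pvTagList tags) 0 PySem.Set.empty PySem.Dict.empty
    (by simp [PySem.Dict.keys_empty])
  have hfilt : (PySem.List.enumerate (pvTagList tags) 0).filter
      (fun p => !(PySem.Set.contains PySem.Set.empty p.2))
      = PySem.List.enumerate (pvTagList tags) 0 := by
    apply List.filter_eq_self.2
    intro p _
    simp [PySem.Set.empty]
  rw [hfilt] at h
  have hnodup : ((pvBuild (PySem.List.enumerate (pvTagList tags) 0)).map Prod.fst).Nodup := by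
    apply pvBuild_keys_nodup
    rw [PySem.List.map_fst_enumerate]
    exact PySem.List.nodup_pyRange_one 0 _
  have hB := PySem.Dict.items_foldl_insert_fresh
    (l := pvBuild (PySem.List.enumerate (pvTagList tags) 0))
    (k := Prod.fst) (v := Prod.snd) (d := PySem.Dict.empty)
    (by intro a _; exact PySem.Dict.contains_empty a.1) (by simpa using hnodup)
  simp only [] at h hB ⊢
  rw [h, hB]
  simp
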